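-- pv_equiv track=rewrite | github.com/michelproy/ApprendrePython | mon_python.py | is_binairo_line_valid
-- ===== SOURCE A (Python) =====
-- def is_binairo_line_valid(line):
--     assert len(line)%2 == 0, f'Line {line} has an odd number of characters'
--
--     # Return False if the line is definitly invalid
--     for i in range(len(line) - 2):
--         if line[i] == line[i+1] == line[i+2] == '0':
--             return False
--         if line[i] == line[i+1] == line[i+2] == '1':
--             return False
--
--     nb_zero = sum(1 for i in line if i == '0')
--     nb_ones = sum(1 for i in line if i == '1')
--     nb_dash = len(line) - nb_zero - nb_ones
--     half_size = len(line) // 2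
--
--     if nb_dash > 0 and nb_ones == half_size:
--         new_line = ''
--         for i in line:
--             if i == '-':
--                 new_line += '0'
--             else:
--                 new_line += i
--         return is_binairo_line_valid(new_line)
--
--     if nb_zero > half_size or nb_ones > half_size:
--         return False
--
--     return True # si valide
-- ===== SOURCE B (Python) =====
-- def is_binairo_line_valid(line):
--     assert len(line)%2 == 0, f'Line {line} has an odd number of characters'
--     if '000' in line or '111' in line:
--         return False
--     half = len(line) // 2
--     nb_zero = line.count('0')
--     nb_ones = line.count('1')
--     nb_dash = len(line) - nb_zero - nb_ones
--     if nb_dash > 0 and nb_ones == half: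
--         return '000' not in line.replace('-', '0')
--     return nb_zero <= half and nb_ones <= half
-- ===== Notes on version B (the rewrite author's own statement) =====
-- stated objective: simpler
-- what changed: B is flat and non-recursive: two substring membership tests for a run of three equal marks replace A's index triple-scan, str.count replaces the generator sums, and the dash-fill branch directly tests the filled line for a run of three zeros instead of recursing.
import Mathlib
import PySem

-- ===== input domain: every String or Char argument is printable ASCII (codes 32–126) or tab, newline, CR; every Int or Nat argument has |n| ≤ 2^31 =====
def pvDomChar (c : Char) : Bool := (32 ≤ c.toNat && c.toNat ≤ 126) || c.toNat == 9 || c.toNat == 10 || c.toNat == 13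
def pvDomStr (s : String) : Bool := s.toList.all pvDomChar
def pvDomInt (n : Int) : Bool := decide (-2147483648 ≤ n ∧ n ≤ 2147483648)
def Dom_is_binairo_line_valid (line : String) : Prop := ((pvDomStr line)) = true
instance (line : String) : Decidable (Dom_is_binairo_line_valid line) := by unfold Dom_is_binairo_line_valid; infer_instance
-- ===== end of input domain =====

-- B replaces A's index triple-scan and single-level recursion by a flat decomposition:
-- substring triple tests, counts, and a direct test of the dash-filled line (simpler; return value only).


-- ===== PORT A =====
-- A's index loop `for i in range(len(line)-2): …` with its two early returns
def pvScanA (l : List Char) : Bool :=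
  (PySem.List.pyRange 0 ((l.length : Int) - 2) 1).any (fun i =>
    ((PySem.List.pyGet? l i == some '0') && (PySem.List.pyGet? l (i+1) == some '0') && (PySem.List.pyGet? l (i+2) == some '0')) ||
    ((PySem.List.pyGet? l i == some '1') && (PySem.List.pyGet? l (i+1) == some '1') && (PySem.List.pyGet? l (i+2) == some '1')))

-- A's body; the assert raises on odd length (outside Pre_, not modelled).  fuel bounds the
-- recursion depth: a terminating run of A recurses at most once (the filled line has no '-'),
-- so fuel 2 is exact wherever A returns; fuel 0 (A diverges, outside Pre_) returns false.
def goA (fuel : Nat) (l : List Char) : Bool :=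
  match fuel with
  | 0 => false
  | fuel + 1 =>
    if pvScanA l then false
    else
      let nb_zero : Int := ((l.filter (fun i => i == '0')).map (fun _ => (1 : Int))).sum
      let nb_ones : Int := ((l.filter (fun i => i == '1')).map (fun _ => (1 : Int))).sum
      let nb_dash : Int := (l.length : Int) - nb_zero - nb_ones
      let half : Int := PySem.Int.floordiv (l.length : Int) 2
      if 0 < nb_dash ∧ nb_ones = half then
        goA fuel (l.foldl (fun acc i => if i == '-' then acc ++ ['0'] else acc ++ [i]) [])
      else if nb_zero > half ∨ nb_ones > half then false
      else true

def is_binairo_line_valid (line : String) : Bool := goA 2 line.toList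

-- ===== PORT B =====
-- hand-written port of Python's substring test `ccc in line` (PySem has no `in`-on-str primitive)
def pvHasTriple (c : Char) : List Char → Bool
  | a :: b :: d :: r => (a == c && b == c && d == c) || pvHasTriple c (b :: d :: r)
  | _ => false

def is_binairo_line_valid_alt (line : String) : Bool :=
  let l := line.toList
  if pvHasTriple '0' l || pvHasTriple '1' l then false
  else
    let half : Int := PySem.Int.floordiv (l.length : Int) 2
    let nb_zero : Int := (l.count '0' : Int)
    let nb_ones : Int := (l.count '1' : Int)
    let nb_dash : Int := (l.length : Int) - nb_zero - nb_ones
    if 0 < nb_dash ∧ nb_ones = half then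
      !pvHasTriple '0' (l.map (fun c => if c == '-' then '0' else c))
    else
      decide (nb_zero ≤ half) && decide (nb_ones ≤ half)

-- ===== PRECONDITION & SPEC =====
-- Pre_ excludes odd-length lines, on which A's assert raises AssertionError, and the lines on
-- which A recurses forever (a character other than zero/one/dash is counted as a dash yet
-- survives the dash fill, so the recursion reaches a fixed point without returning):
-- A returns on exactly Pre_.
def Pre_is_binairo_line_valid (line : String) : Prop :=
  line.toList.length % 2 = 0 ∧
  ¬ (0 < (line.toList.filter (fun c => ¬ (c = '0' ∨ c = '1' ∨ c = '-'))).length ∧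
     line.toList.count '1' = line.toList.length / 2 ∧
     ¬ ['1', '1', '1'] <:+: line.toList ∧
     ¬ ['0', '0', '0'] <:+: line.toList.map (fun c => if c == '-' then '0' else c))
instance (line : String) : Decidable (Pre_is_binairo_line_valid line) := by
  unfold Pre_is_binairo_line_valid; infer_instance

def pvWitness_is_binairo_line_valid : String := "01-0"

def Spec_is_binairo_line_valid (line : String) (out : Bool) : Prop := out = is_binairo_line_valid_alt line
instance (line : String) (out : Bool) : Decidable (Spec_is_binairo_line_valid line out) := by unfold Spec_is_binairo_line_valid; infer_instance

-- ===== CLAIM (what is proved, stated in full; the proofs are below) =====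
def Claim_equal_is_binairo_line_valid : Prop := ∀ (line : String), Dom_is_binairo_line_valid line → Pre_is_binairo_line_valid line → Spec_is_binairo_line_valid line (is_binairo_line_valid line)

-- ===== LEMMAS AND PROOFS =====

-- one window of the triple scan, at nat index
def pvWin (l : List Char) (i : Nat) : Bool :=
  (l[i]? == some '0' && l[i+1]? == some '0' && l[i+2]? == some '0') ||
  (l[i]? == some '1' && l[i+1]? == some '1' && l[i+2]? == some '1')

lemma scan_aux (l : List Char) :
    (List.range (l.length - 2)).any (pvWin l) = (pvHasTriple '0' l || pvHasTriple '1' l) := by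
  match l with
  | [] => rfl
  | [a] => rfl
  | [a, b] => rfl
  | a :: b :: c :: r =>
    have ih := scan_aux (b :: c :: r)
    have h1 : (b :: c :: r : List Char).length - 2 = r.length := by simp
    have h2 : (a :: b :: c :: r : List Char).length - 2 = r.length + 1 := by simp
    rw [h1] at ih
    rw [h2, List.range_succ_eq_map, List.any_cons, List.any_map,
        show (pvWin (a :: b :: c :: r)) ∘ Nat.succ = pvWin (b :: c :: r) from funext fun i => rfl,
        ih]
    simp only [pvWin, pvHasTriple, List.getElem?_cons_zero, List.getElem?_cons_succ,
      Option.some_beq_some]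
    cases a == '0' <;> cases b == '0' <;> cases c == '0' <;>
      cases a == '1' <;> cases b == '1' <;> cases c == '1' <;>
      cases pvHasTriple '0' (b :: c :: r) <;> cases pvHasTriple '1' (b :: c :: r) <;> rfl
termination_by l.length

lemma scanA_eq (l : List Char) : pvScanA l = (pvHasTriple '0' l || pvHasTriple '1' l) := by
  rw [← scan_aux]
  match l with
  | [] => rfl
  | [a] => rfl
  | a :: b :: t =>
    unfold pvScanA
    have h2 : ((a :: b :: t : List Char).length : Int) - 2 = ((t.length : Nat) : Int) := by
      simp [List.length_cons]; ring
    have h3 : (a :: b :: t : List Char).length - 2 = t.length := by simp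
    rw [h2, h3, PySem.List.pyRange_zero_natCast, List.any_map]
    apply congrArg
    funext i
    simp only [Function.comp_apply, pvWin,
      show ((i : Int) + 1) = ((i + 1 : Nat) : Int) from by push_cast; ring,
      show ((i : Int) + 2) = ((i + 2 : Nat) : Int) from by push_cast; ring,
      PySem.List.pyGet?_natCast]

lemma hasTriple_iff_infix (c : Char) (l : List Char) :
    pvHasTriple c l = true ↔ [c, c, c] <:+: l := by
  match l with
  | [] => simp [pvHasTriple]
  | [a] => simp [pvHasTriple, List.infix_cons_iff, List.cons_prefix_cons]
  | [a, b] => simp [pvHasTriple, List.infix_cons_iff, List.cons_prefix_cons]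
  | a :: b :: d :: r =>
    have ih := hasTriple_iff_infix c (b :: d :: r)
    rw [List.infix_cons_iff]
    simp only [pvHasTriple, Bool.or_eq_true, Bool.and_eq_true, beq_iff_eq, ih,
      List.cons_prefix_cons, List.nil_prefix, and_true,
      @eq_comm _ a c, @eq_comm _ b c, @eq_comm _ d c]
    tauto

lemma count_sum (c : Char) (l : List Char) :
    ((l.filter (fun i => i == c)).map (fun _ => (1 : Int))).sum = (l.count c : Int) := by
  rw [PySem.List.sum_map_const_int]
  simp [List.count_eq_countP, List.countP_eq_length_filter]

lemma fill_foldl (l : List Char) :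
    l.foldl (fun acc i => if i == '-' then acc ++ ['0'] else acc ++ [i]) []
      = l.map (fun c => if c == '-' then '0' else c) := by
  rw [show (fun (acc : List Char) (i : Char) => if i == '-' then acc ++ ['0'] else acc ++ [i])
        = (fun acc i => acc ++ [if i == '-' then '0' else i]) from
      funext fun acc => funext fun i => by split <;> rfl]
  simpa using PySem.List.foldl_append_singleton_eq_map (fun i => if i == '-' then '0' else i) l []

lemma triple_one_fill (l : List Char) :
    pvHasTriple '1' (l.map (fun c => if c == '-' then '0' else c)) = pvHasTriple '1' l := by
  match l with
  | [] => rfl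
  | [a] => rfl
  | [a, b] => rfl
  | a :: b :: c :: r =>
    have ih := triple_one_fill (b :: c :: r)
    simp only [List.map_cons] at ih ⊢
    simp only [pvHasTriple, ih]
    have key : ∀ x : Char, ((if x == '-' then '0' else x) == '1') = (x == '1') := by
      intro x
      by_cases h : x = '-' <;> simp [h]
    rw [key a, key b, key c]
termination_by l.length

lemma count_fill (l : List Char) :
    (l.map (fun c => if c == '-' then '0' else c)).count '0' = l.count '0' + l.count '-' ∧
    (l.map (fun c => if c == '-' then '0' else c)).count '1' = l.count '1' := by
  induction l with
  | nil => simp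
  | cons a t ih =>
    by_cases h : a = '-' <;> by_cases h0 : a = '0' <;> by_cases h1 : a = '1' <;>
      simp_all <;> omega

lemma length_partition (l : List Char) :
    l.length = l.count '0' + l.count '1' + l.count '-'
      + (l.filter (fun c => ¬ (c = '0' ∨ c = '1' ∨ c = '-'))).length := by
  induction l with
  | nil => simp
  | cons a t ih =>
    by_cases h : a = '-' <;> by_cases h0 : a = '0' <;> by_cases h1 : a = '1' <;>
      simp_all <;> omega

-- ===== VERDICT (by name: the statement is the Claim_ definition above) =====
theorem is_binairo_line_valid_spec : Claim_equal_is_binairo_line_valid := by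
  intro line _hdom hpre
  obtain ⟨heven, hnd⟩ := hpre
  unfold Spec_is_binairo_line_valid is_binairo_line_valid is_binairo_line_valid_alt
  set l := line.toList with hl
  simp only [goA, scanA_eq, count_sum, fill_foldl]
  by_cases hT : (pvHasTriple '0' l || pvHasTriple '1' l) = true
  · simp [hT]
  · have hT' := hT
    rw [Bool.or_eq_true, not_or, Bool.not_eq_true, Bool.not_eq_true] at hT'
    obtain ⟨hT0, hT1⟩ := hT'
    simp only [hT0, hT1, Bool.or_self, Bool.false_eq_true, if_false]
    simp only [triple_one_fill, hT1, Bool.or_false, List.length_map,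
      (count_fill l).1, (count_fill l).2]
    have hhalf : PySem.Int.floordiv ((l.length : Nat) : Int) 2 = ((l.length / 2 : Nat) : Int) := by
      exact_mod_cast PySem.Int.floordiv_natCast l.length 2
    simp only [hhalf]
    by_cases hC : (0:Int) < (l.length : Int) - (List.count '0' l : Int) - (List.count '1' l : Int)
        ∧ ((List.count '1' l : Nat) : Int) = ((l.length / 2 : Nat) : Int)
    · simp only [if_pos hC]
      cases hT0f : pvHasTriple '0' (l.map fun c => if c == '-' then '0' else c) with
      | true => simp
      | false =>
        simp only [Bool.false_eq_true, if_false, Bool.not_false]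
        have honesN : List.count '1' l = l.length / 2 := by exact_mod_cast hC.2
        have haliens : (List.filter (fun c => decide ¬(c = '0' ∨ c = '1' ∨ c = '-')) l).length = 0 := by
          by_contra h
          refine hnd ⟨Nat.pos_of_ne_zero h, honesN, ?_, ?_⟩
          · rw [← hasTriple_iff_infix, hT1]; simp
          · rw [← hasTriple_iff_infix, hT0f]; simp
        have hpart := length_partition l
        rw [haliens] at hpart
        rw [if_neg (by push_cast; omega), if_neg (by push_cast; omega)]
    · simp only [if_neg hC]
      split_ifs with h
      · rcases h with h | h <;> symm <;> simp only [Bool.and_eq_false_iff, decide_eq_false_iff_not]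
        · left; omega
        · right; omega
      · push Not at h
        symm
        simp only [Bool.and_eq_true, decide_eq_true_eq]
        exact ⟨by omega, by omega⟩
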